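-- pv_equiv track=rewrite | github.com/lihaojia24/leetcode | python/1388.py | maxSizeSlices
-- ===== SOURCE A (Python) =====
-- from typing import List
--
-- def maxSizeSlices(slices: List[int]) -> int:
--     n = len(slices) // 3
--     def help(sc: List[int]) -> int:
--         m = len(sc)
--         dp = [[0] * (n+1) for _ in range(m+1)]
--         for i in range(1, m+1):
--             for j in range(1, n+1):
--                 dp[i][j] = max(dp[i-1][j], sc[i-1] + (dp[i-2][j-1] if i >= 2 else 0))
--         return dp[m][n]
--     x, y = help(slices[1:]), help(slices[:-1])
--     return max(x,y)
-- ===== SOURCE B (Python) =====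
-- from typing import List
--
-- def maxSizeSlices(slices: List[int]) -> int:
--     # Divide and conquer with boundary profiles: for each segment keep, for every
--     # pick-count j and every (first-picked?, last-picked?) status, the best sum of
--     # exactly j pairwise non-adjacent picks; segments are merged by a (max,+)
--     # convolution that forbids picking both touching endpoints.
--     n = len(slices) // 3
--
--     def omax(p, q):
--         if p is None:
--             return q
--         if q is None:
--             return p
--         return max(p, q)
--
--     def oadd(p, q):
--         if p is None or q is None:
--             return None
--         return p + q
--
--     def conv(P, Q, j):
--         # best split of j picks between the two segments (None-padded reads)
--         best = None
--         for j1 in range(j + 1):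
--             a = P[j1] if j1 < len(P) else None
--             b = Q[j - j1] if j - j1 < len(Q) else None
--             best = omax(best, oadd(a, b))
--         return best
--
--     def merge(L, R, K):
--         Lff, Lft, Ltf, Ltt = L
--         Rff, Rft, Rtf, Rtt = R
--
--         def row(Paf, Pat, Qfc, Qtc):
--             # allowed boundary pairs: (skip,skip), (skip,take), (take,skip)
--             return [omax(omax(conv(Paf, Qfc, j), conv(Paf, Qtc, j)),
--                          conv(Pat, Qfc, j)) for j in range(K)]
--
--         return (row(Lff, Lft, Rff, Rtf), row(Lff, Lft, Rft, Rtt),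
--                 row(Ltf, Ltt, Rff, Rtf), row(Ltf, Ltt, Rft, Rtt))
--
--     def prof(sc):
--         if len(sc) == 1:
--             x = sc[0]
--             K0 = min(n, 1) + 1
--             return ([0 if j == 0 else None for j in range(K0)],
--                     [None for _ in range(K0)],
--                     [None for _ in range(K0)],
--                     [x if j == 1 else None for j in range(K0)])
--         mid = len(sc) // 2
--         K = min(n, (len(sc) + 1) // 2) + 1
--         return merge(prof(sc[:mid]), prof(sc[mid:]), K)
--
--     def best(sc):
--         if not sc:
--             return 0
--         ans = None
--         for r in prof(sc):
--             for v in r: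
--                 ans = omax(ans, v)
--         return ans  # never None: the (skip, skip, 0 picks) entry is 0
--
--     return max(best(slices[1:]), best(slices[:-1]))
-- ===== Notes on version B (the rewrite author's own statement) =====
-- stated objective: alternative
-- what changed: Replaces A's row-by-row 2-D DP table with a divide-and-conquer algorithm: each half-segment is summarized by a boundary profile (best sum of exactly j non-adjacent picks per first/last-picked status) and profiles are merged by a (max,+) convolution forbidding adjacent endpoint picks.
import Mathlib
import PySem

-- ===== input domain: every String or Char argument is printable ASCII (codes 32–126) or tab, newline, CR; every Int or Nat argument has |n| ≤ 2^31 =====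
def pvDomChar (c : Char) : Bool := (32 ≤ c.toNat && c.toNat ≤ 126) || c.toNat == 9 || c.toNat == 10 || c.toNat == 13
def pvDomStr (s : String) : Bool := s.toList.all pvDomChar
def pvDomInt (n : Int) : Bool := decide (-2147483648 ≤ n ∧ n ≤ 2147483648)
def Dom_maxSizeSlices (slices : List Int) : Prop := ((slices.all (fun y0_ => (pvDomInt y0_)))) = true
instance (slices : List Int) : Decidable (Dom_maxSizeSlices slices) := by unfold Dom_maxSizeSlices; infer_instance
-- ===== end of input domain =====

-- B replaces A's row-by-row 2-D DP table with a divide-and-conquer algorithm over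
-- boundary profiles merged by (max,+) convolution; same return value, no speed claim.

-- ===== PORT A =====
-- dp[i][j] read/write; Python indices here are always nonnegative and in range, so getD/set are exact.
def pvGet2 (dp : List (List Int)) (i j : Nat) : Int := (dp.getD i []).getD j 0

def pvSet2 (dp : List (List Int)) (i j : Nat) (v : Int) : List (List Int) :=
  dp.set i ((dp.getD i []).set j v)

-- help(sc): builds the (m+1)×(n+1) table row by row exactly as A does
def pvHelp (n : Nat) (sc : List Int) : Int :=
  let m := sc.length
  let dp0 : List (List Int) := List.replicate (m+1) (List.replicate (n+1) 0)
  -- range(1, m+1) / range(1, n+1)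
  let dp := (List.range' 1 m).foldl (fun dp i =>
      (List.range' 1 n).foldl (fun dp j =>
        pvSet2 dp i j (max (pvGet2 dp (i-1) j)
          (sc.getD (i-1) 0 + (if 2 ≤ i then pvGet2 dp (i-2) (j-1) else 0)))) dp) dp0
  pvGet2 dp m n

def maxSizeSlices (slices : List Int) : Int :=
  let n := slices.length / 3
  let x := pvHelp n (slices.drop 1)      -- slices[1:]
  let y := pvHelp n (slices.dropLast)    -- slices[:-1]
  max x y

-- ===== PORT B =====
-- omax/oadd: max / sum on Optional ints, None = infeasible
def pvOmax : Option Int → Option Int → Option Int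
  | none, q => q
  | some a, none => some a
  | some a, some b => some (max a b)

def pvOadd : Option Int → Option Int → Option Int
  | some a, some b => some (a + b)
  | _, _ => none

-- conv(P, Q, j): best split of j picks between the two segments (out-of-range reads are None = getD … none)
def pvConv (P Q : List (Option Int)) (j : Nat) : Option Int :=
  (List.range (j+1)).foldl
    (fun best j1 => pvOmax best (pvOadd (P.getD j1 none) (Q.getD (j - j1) none))) none

-- row(Paf, Pat, Qfc, Qtc): allowed boundary pairs (skip,skip), (skip,take), (take,skip)
def pvRowB (Paf Pat Qfc Qtc : List (Option Int)) (K : Nat) : List (Option Int) :=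
  (List.range K).map (fun j =>
    pvOmax (pvOmax (pvConv Paf Qfc j) (pvConv Paf Qtc j)) (pvConv Pat Qfc j))

def pvMergeB (L R : List (Option Int) × List (Option Int) × List (Option Int) × List (Option Int))
    (K : Nat) : List (Option Int) × List (Option Int) × List (Option Int) × List (Option Int) :=
  (pvRowB L.1 L.2.1 R.1 R.2.2.1 K, pvRowB L.1 L.2.1 R.2.1 R.2.2.2 K,
   pvRowB L.2.2.1 L.2.2.2 R.1 R.2.2.1 K, pvRowB L.2.2.1 L.2.2.2 R.2.1 R.2.2.2 K)

-- prof(sc); Python's prof is only ever called on nonempty sc, the [] branch is an unreachable filler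
def pvProfB (n : Nat) : List Int →
    List (Option Int) × List (Option Int) × List (Option Int) × List (Option Int)
  | [] => ([], [], [], [])
  | [x] =>
      ((List.range (min n 1 + 1)).map (fun j => if j = 0 then some (0:Int) else none),
       (List.range (min n 1 + 1)).map (fun _ => none),
       (List.range (min n 1 + 1)).map (fun _ => none),
       (List.range (min n 1 + 1)).map (fun j => if j = 1 then some x else none))
  | x :: y :: rest =>
      pvMergeB (pvProfB n ((x :: y :: rest).take ((x :: y :: rest).length / 2)))
               (pvProfB n ((x :: y :: rest).drop ((x :: y :: rest).length / 2)))
               (min n (((x :: y :: rest).length + 1) / 2) + 1)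
termination_by sc => sc.length
decreasing_by
  · simp; omega
  · simp; omega

-- best(sc): fold omax over all profile entries; the result is never None
-- (the (skip, skip, 0 picks) entry is 0), so Python's final `return ans` is `.getD 0`
def pvBestB (n : Nat) (sc : List Int) : Int :=
  if sc = [] then 0
  else
    let P := pvProfB n sc
    (P.2.2.2.foldl pvOmax (P.2.2.1.foldl pvOmax (P.2.1.foldl pvOmax (P.1.foldl pvOmax none)))).getD 0

def maxSizeSlices_alt (slices : List Int) : Int :=
  let n := slices.length / 3
  max (pvBestB n (slices.drop 1)) (pvBestB n (slices.dropLast))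

-- ===== PRECONDITION & SPEC =====
def Spec_maxSizeSlices (slices : List Int) (out : Int) : Prop := out = maxSizeSlices_alt slices
instance (slices : List Int) (out : Int) : Decidable (Spec_maxSizeSlices slices out) := by unfold Spec_maxSizeSlices; infer_instance

-- ===== CLAIM (what is proved, stated in full; the proofs are below) =====
def Claim_equal_maxSizeSlices : Prop := ∀ (slices : List Int), Dom_maxSizeSlices slices → Spec_maxSizeSlices slices (maxSizeSlices slices)

-- ===== LEMMAS AND PROOFS =====

-- mathematical model of the DP recurrence, dp[-1] read as the zero row
def dpF (sc : List Int) : Nat → Nat → Int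
  | 0, _ => 0
  | _+1, 0 => 0
  | 1, _+1 => max (dpF sc 0 1) (sc.getD 0 0 + 0)
  | i+2, j+1 => max (dpF sc (i+1) (j+1)) (sc.getD (i+1) 0 + dpF sc i j)

theorem dpF_succ (sc : List Int) (i j : Nat) :
    dpF sc (i+1) (j+1) = max (dpF sc i (j+1)) (sc.getD i 0 + dpF sc (i-1) j) := by
  cases i with
  | zero => simp [dpF]
  | succ k => rfl

theorem dpF_zero_left (sc : List Int) (j : Nat) : dpF sc 0 j = 0 := rfl

theorem dpF_zero_right (sc : List Int) (i : Nat) : dpF sc i 0 = 0 := by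
  cases i <;> rfl

theorem dpF_prefix (p t : List Int) : ∀ i j, i ≤ p.length → dpF (p ++ t) i j = dpF p i j := by
  intro i
  induction i using Nat.strong_induction_on with
  | _ i ih =>
    intro j hi
    match i, j with
    | 0, _ => rfl
    | i+1, 0 => simp [dpF_zero_right]
    | i+1, j+1 =>
      rw [dpF_succ, dpF_succ]
      have h1 : (p ++ t).getD i 0 = p.getD i 0 := by
        have : i < p.length := hi
        simp [List.getD, List.getElem?_append_left this]
      rw [h1, ih i (Nat.lt_succ_self i) (j+1) (Nat.le_of_succ_le hi),
          ih (i-1) (by omega) j (by omega)]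

-- "take" row after scanning m elements
def takeF (sc : List Int) (m j : Nat) : Int :=
  if m = 0 ∨ j = 0 then 0 else sc.getD (m-1) 0 + dpF sc (m-2) (j-1)

theorem max_take_skip (sc : List Int) (m j : Nat) :
    max (takeF sc m j) (dpF sc (m-1) j) = dpF sc m j := by
  match m, j with
  | 0, j => simp [takeF, dpF_zero_left]
  | m+1, 0 => simp [takeF, dpF_zero_right]
  | m+1, j+1 =>
    rw [dpF_succ]
    simp only [takeF, Nat.add_sub_cancel]
    simp [max_comm]

-- map over range as a row
theorem row_getD {f : Nat → Int} {n j : Nat} (h : j ≤ n) :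
    ((List.range (n+1)).map f).getD j 0 = f j := by
  rw [List.getD_eq_getElem?_getD]
  rw [List.getElem?_map]
  simp [List.getElem?_range (by omega : j < n+1)]

theorem row_const (n : Nat) (f : Nat → Int) (h : ∀ j, f j = 0) :
    (List.range (n+1)).map f = List.replicate (n+1) 0 := by
  have := List.eq_replicate_of_mem (l := (List.range (n+1)).map f) (a := (0:Int)) ?_
  · simpa using this
  intro b hb
  simp only [List.mem_map] at hb
  obtain ⟨a, _, rfl⟩ := hb
  exact h a

-- ===== A-side: the imperative table build fills row i with dpF sc i =====
def rowR (sc : List Int) (n i : Nat) : List Int := (List.range (n+1)).map (dpF sc i)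

-- partially filled row i: entries 1..t computed, the rest still 0
def prow (sc : List Int) (n i t : Nat) : List Int :=
  (List.range (n+1)).map (fun j => if j ≤ t then dpF sc i j else 0)

theorem getD_set_ne (dp : List (List Int)) (i k : Nat) (r : List Int) (h : i ≠ k) :
    ((dp.set i r).getD k []) = dp.getD k [] := by
  simp [List.getD, List.getElem?_set_ne h]

theorem getD_set_self (dp : List (List Int)) (i : Nat) (r : List Int) (h : i < dp.length) :
    ((dp.set i r).getD i []) = r := by
  simp [List.getD, List.getElem?_set_self h]

theorem prow_zero (sc : List Int) (n i : Nat) : prow sc n i 0 = List.replicate (n+1) 0 := by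
  apply row_const
  intro j
  cases j with
  | zero => simp [dpF_zero_right]
  | succ k => simp

theorem prow_full (sc : List Int) (n i : Nat) : prow sc n i n = rowR sc n i := by
  apply List.map_congr_left
  intro j hj
  simp only [List.mem_range] at hj
  simp [Nat.lt_succ_iff.mp hj]

theorem prow_set (sc : List Int) (n i t : Nat) (_ht : t + 1 ≤ n) :
    (prow sc n i t).set (t+1) (dpF sc i (t+1)) = prow sc n i (t+1) := by
  apply List.ext_getElem
  · simp [prow]
  intro j h1 h2
  simp only [prow, List.length_set, List.length_map, List.length_range] at h1 h2 ⊢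
  rcases eq_or_ne j (t+1) with rfl | hne
  · rw [List.getElem_set_self (by simpa [prow] using h2)]
    simp [List.getElem_map]
  · rw [List.getElem_set_ne (by omega)]
    simp only [List.getElem_map, List.getElem_range]
    by_cases hj : j ≤ t
    · rw [if_pos hj, if_pos (by omega)]
    · rw [if_neg hj, if_neg (by omega)]

-- one pass of the inner loop fills row i up to column t
theorem inner_fold (n : Nat) (sc : List Int) (i : Nat) (hi : 1 ≤ i)
    (dp : List (List Int)) (hlen : i < dp.length)
    (h1 : dp.getD (i-1) [] = rowR sc n (i-1))
    (h2 : 2 ≤ i → dp.getD (i-2) [] = rowR sc n (i-2))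
    (h0 : dp.getD i [] = List.replicate (n+1) 0) :
    ∀ t, t ≤ n → (List.range' 1 t).foldl (fun dp j =>
        pvSet2 dp i j (max (pvGet2 dp (i-1) j)
          (sc.getD (i-1) 0 + (if 2 ≤ i then pvGet2 dp (i-2) (j-1) else 0)))) dp
      = dp.set i (prow sc n i t) := by
  intro t
  induction t with
  | zero =>
    intro _
    rw [prow_zero, ← h0]
    simp [List.set_getElem_self, List.getD, List.getElem?_eq_getElem hlen]
  | succ t iht =>
    intro ht
    rw [List.range'_concat, List.foldl_append, iht (by omega), List.foldl_cons, List.foldl_nil]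
    have hne1 : i ≠ i - 1 := by omega
    have hread1 : pvGet2 (dp.set i (prow sc n i t)) (i-1) (1 + 1*t) = dpF sc (i-1) (t+1) := by
      unfold pvGet2
      rw [getD_set_ne _ _ _ _ hne1, h1]
      have : 1 + 1*t = t + 1 := by omega
      rw [this]
      exact row_getD (by omega)
    have hread2 : (if 2 ≤ i then pvGet2 (dp.set i (prow sc n i t)) (i-2) (1 + 1*t - 1) else 0)
        = dpF sc (i-1-1) t := by
      split_ifs with h
      · unfold pvGet2
        rw [getD_set_ne _ _ _ _ (by omega), h2 h]
        have : 1 + 1*t - 1 = t := by omega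
        rw [this]
        have : i - 2 = i - 1 - 1 := by omega
        rw [this]
        exact row_getD (by omega)
      · have : i - 1 - 1 = 0 := by omega
        rw [this, dpF_zero_left]
    rw [hread1, hread2]
    unfold pvSet2
    rw [List.set_set, getD_set_self _ _ _ hlen]
    have hv : max (dpF sc (i-1) (t+1)) (sc.getD (i-1) 0 + dpF sc (i-1-1) t) = dpF sc i (t+1) := by
      obtain ⟨k, rfl⟩ : ∃ k, i = k + 1 := ⟨i - 1, by omega⟩
      rw [dpF_succ]
      simp
    have hj : 1 + 1*t = t + 1 := by omega
    rw [hj, hv, prow_set sc n i t ht]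

-- the table after k outer iterations
def tabT (sc : List Int) (n m k : Nat) : List (List Int) :=
  (List.range (k+1)).map (rowR sc n) ++ List.replicate (m - k) (List.replicate (n+1) 0)

theorem tabT_getD_lt (sc : List Int) (n m k r : Nat) (h : r ≤ k) :
    (tabT sc n m k).getD r [] = rowR sc n r := by
  unfold tabT
  rw [List.getD, List.getElem?_append_left (by simp; omega), List.getElem?_map]
  simp [List.getElem?_range (by omega : r < k+1)]

theorem tabT_getD_gt (sc : List Int) (n m k r : Nat) (hk : k < r) (hr : r ≤ m) :
    (tabT sc n m k).getD r [] = List.replicate (n+1) 0 := by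
  unfold tabT
  rw [List.getD, List.getElem?_append_right (by simp; omega)]
  simp only [List.length_map, List.length_range, List.getElem?_replicate]
  rw [if_pos (by omega)]
  rfl

theorem tabT_length (sc : List Int) (n m k : Nat) (h : k ≤ m) :
    (tabT sc n m k).length = m + 1 := by
  simp [tabT]
  omega

theorem tabT_set (sc : List Int) (n m k : Nat) (h : k < m) :
    (tabT sc n m k).set (k+1) (rowR sc n (k+1)) = tabT sc n m (k+1) := by
  unfold tabT
  have hz : List.replicate (m - k) (List.replicate (n+1) (0:Int))
      = List.replicate (n+1) 0 :: List.replicate (m - (k+1)) (List.replicate (n+1) 0) := by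
    have : m - k = (m - (k+1)) + 1 := by omega
    rw [this, List.replicate_succ]
  rw [hz, List.set_append_right _ _ (by simp)]
  have : k + 1 - ((List.range (k+1)).map (rowR sc n)).length = 0 := by simp
  rw [this]
  rw [show (List.range (k+1+1)) = List.range (k+1) ++ [k+1] from List.range_succ,
      List.map_append]
  simp

theorem outer_fold (n : Nat) (sc : List Int) :
    ∀ k, k ≤ sc.length → (List.range' 1 k).foldl (fun dp i =>
      (List.range' 1 n).foldl (fun dp j =>
        pvSet2 dp i j (max (pvGet2 dp (i-1) j)
          (sc.getD (i-1) 0 + (if 2 ≤ i then pvGet2 dp (i-2) (j-1) else 0)))) dp)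
      (List.replicate (sc.length+1) (List.replicate (n+1) 0))
      = tabT sc n sc.length k := by
  intro k
  induction k with
  | zero =>
    intro _
    have h0 : rowR sc n 0 = List.replicate (n+1) 0 := row_const n _ (dpF_zero_left sc)
    simp [tabT, h0, List.replicate_succ, List.range_one]
  | succ k ihk =>
    intro hk
    rw [List.range'_concat, List.foldl_append, ihk (by omega), List.foldl_cons, List.foldl_nil]
    have hi : 1 + 1*k = k + 1 := by omega
    rw [hi]
    rw [inner_fold n sc (k+1) (by omega) _
        (by rw [tabT_length sc n sc.length k (by omega)]; omega)
        (by simpa using tabT_getD_lt sc n sc.length k k (le_refl k))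
        (fun h => by
          have : k + 1 - 2 = k - 1 := by omega
          rw [this]
          exact tabT_getD_lt sc n sc.length k (k-1) (by omega))
        (tabT_getD_gt sc n sc.length k (k+1) (by omega) hk)
        n (le_refl n)]
    rw [prow_full, tabT_set sc n sc.length k (by omega)]

theorem pvHelp_eq (n : Nat) (sc : List Int) : pvHelp n sc = dpF sc sc.length n := by
  unfold pvHelp
  simp only
  rw [outer_fold n sc sc.length (le_refl _)]
  unfold pvGet2
  rw [tabT_getD_lt sc n sc.length sc.length sc.length (le_refl _)]
  exact row_getD (le_refl n)

-- ===== B-side mathematics =====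

theorem pvOmax_none_right (p : Option Int) : pvOmax p none = p := by cases p <;> rfl

theorem pvOmax_none_left (p : Option Int) : pvOmax none p = p := rfl

theorem pvOmax_comm (p q : Option Int) : pvOmax p q = pvOmax q p := by
  cases p <;> cases q <;> simp [pvOmax, max_comm]

theorem pvOmax_assoc (p q r : Option Int) : pvOmax (pvOmax p q) r = pvOmax p (pvOmax q r) := by
  cases p <;> cases q <;> cases r <;> simp [pvOmax, max_assoc]

theorem pvOmax_left_comm (p q r : Option Int) : pvOmax p (pvOmax q r) = pvOmax q (pvOmax p r) := by
  rw [← pvOmax_assoc, pvOmax_comm p q, pvOmax_assoc]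

theorem pvOadd_none_right (p : Option Int) : pvOadd p none = none := by cases p <;> rfl

theorem pvOadd_none_left (p : Option Int) : pvOadd none p = none := by cases p <;> rfl

theorem pvOadd_zero_left (q : Option Int) : pvOadd (some 0) q = q := by
  cases q <;> simp [pvOadd]

theorem pvOadd_zero_right (q : Option Int) : pvOadd q (some 0) = q := by
  cases q <;> simp [pvOadd]

theorem pvOadd_omax_right (p q r : Option Int) :
    pvOadd (pvOmax p q) r = pvOmax (pvOadd p r) (pvOadd q r) := by
  cases p <;> cases q <;> cases r <;> simp [pvOadd, pvOmax, max_add_add_right]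

theorem pvOadd_omax_left (p q r : Option Int) :
    pvOadd r (pvOmax p q) = pvOmax (pvOadd r p) (pvOadd r q) := by
  cases p <;> cases q <;> cases r <;> simp [pvOadd, pvOmax, max_add_add_left]

theorem pvOadd_assoc (p q r : Option Int) :
    pvOadd (pvOadd p q) r = pvOadd p (pvOadd q r) := by
  cases p <;> cases q <;> cases r <;> simp [pvOadd, Int.add_assoc]

-- fold max over a list of optional values
def bigomax (l : List (Option Int)) : Option Int := l.foldl pvOmax none

theorem foldl_omax_eq (l : List (Option Int)) : ∀ acc, l.foldl pvOmax acc = pvOmax acc (bigomax l) := by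
  induction l with
  | nil => intro acc; simp [bigomax, pvOmax_none_right]
  | cons p l ih =>
    intro acc
    simp only [bigomax, List.foldl_cons, pvOmax_none_left] at *
    rw [ih (pvOmax acc p), ih p, pvOmax_assoc]

theorem bigomax_cons (p : Option Int) (l : List (Option Int)) :
    bigomax (p :: l) = pvOmax p (bigomax l) := by
  simp only [bigomax, List.foldl_cons, pvOmax_none_left]
  exact foldl_omax_eq l p

theorem bigomax_append (l1 l2 : List (Option Int)) :
    bigomax (l1 ++ l2) = pvOmax (bigomax l1) (bigomax l2) := by
  simp only [bigomax, List.foldl_append]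
  exact foldl_omax_eq l2 _

theorem bigomax_map_omax {α : Type} (l : List α) (f g : α → Option Int) :
    bigomax (l.map (fun i => pvOmax (f i) (g i)))
      = pvOmax (bigomax (l.map f)) (bigomax (l.map g)) := by
  induction l with
  | nil => rfl
  | cons a l ih =>
    simp only [List.map_cons, bigomax_cons, ih]
    rw [pvOmax_assoc, pvOmax_assoc]
    congr 1
    rw [← pvOmax_assoc, ← pvOmax_assoc, pvOmax_comm (g a)]

theorem bigomax_map_none {α : Type} (l : List α) :
    bigomax (l.map (fun _ => (none : Option Int))) = none := by
  induction l with
  | nil => rfl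
  | cons a l ih => simp only [List.map_cons, bigomax_cons, ih, pvOmax_none_left]

theorem bigomax_map_oadd_left {α : Type} (x : Int) (l : List α) (h : α → Option Int) :
    bigomax (l.map (fun i => pvOadd (some x) (h i)))
      = pvOadd (some x) (bigomax (l.map h)) := by
  induction l with
  | nil => rfl
  | cons a l ih => simp only [List.map_cons, bigomax_cons, ih, pvOadd_omax_left]

theorem bigomax_map_oadd_right {α : Type} (x : Int) (l : List α) (h : α → Option Int) :
    bigomax (l.map (fun i => pvOadd (h i) (some x)))
      = pvOadd (bigomax (l.map h)) (some x) := by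
  induction l with
  | nil => rfl
  | cons a l ih => simp only [List.map_cons, bigomax_cons, ih, pvOadd_omax_right]

-- function-level truncated (max,+) convolution
def convF (f g : Nat → Option Int) (j : Nat) : Option Int :=
  bigomax ((List.range (j+1)).map (fun j1 => pvOadd (f j1) (g (j - j1))))

theorem convF_zero (f g : Nat → Option Int) : convF f g 0 = pvOadd (f 0) (g 0) := by
  simp [convF, List.range_succ, bigomax, pvOmax_none_left]

theorem convF_succ (f g : Nat → Option Int) (j : Nat) :
    convF f g (j+1) = pvOmax (pvOadd (f 0) (g (j+1))) (convF (fun i => f (i+1)) g j) := by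
  unfold convF
  rw [List.range_succ_eq_map, List.map_cons, bigomax_cons, List.map_map]
  congr 2
  apply List.map_congr_left
  intro j1 _
  simp [Function.comp, Nat.succ_sub_succ]

theorem convF_none_left (g : Nat → Option Int) (j : Nat) :
    convF (fun _ => none) g j = none := by
  unfold convF
  have : ((List.range (j+1)).map (fun j1 => pvOadd (none : Option Int) (g (j - j1))))
      = (List.range (j+1)).map (fun _ => (none : Option Int)) := by
    apply List.map_congr_left; intro a _; rfl
  rw [this, bigomax_map_none]

theorem convF_none_right (f : Nat → Option Int) (j : Nat) :
    convF f (fun _ => none) j = none := by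
  unfold convF
  have : ((List.range (j+1)).map (fun j1 => pvOadd (f j1) (none : Option Int)))
      = (List.range (j+1)).map (fun _ => (none : Option Int)) := by
    apply List.map_congr_left; intro a _; exact pvOadd_none_right _
  rw [this, bigomax_map_none]

theorem convF_congr {f f' g g' : Nat → Option Int} (j : Nat)
    (hf : ∀ i, i ≤ j → f i = f' i) (hg : ∀ i, i ≤ j → g i = g' i) :
    convF f g j = convF f' g' j := by
  unfold convF
  congr 1
  apply List.map_congr_left
  intro a ha
  simp only [List.mem_range] at ha
  rw [hf a (by omega), hg (j - a) (by omega)]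

theorem convF_single_left (v : Int) (j : Nat) :
    ∀ (k : Nat) (g : Nat → Option Int),
      convF (fun i => if i = k then some v else none) g j
        = if k ≤ j then pvOadd (some v) (g (j - k)) else none := by
  induction j with
  | zero =>
    intro k g
    rw [convF_zero]
    cases k with
    | zero => simp
    | succ k => simp [pvOadd_none_left]
  | succ j ih =>
    intro k g
    rw [convF_succ]
    cases k with
    | zero =>
      have h2 : convF (fun i => if i + 1 = 0 then some v else none) g j = none := by
        rw [convF_congr j (f' := fun _ => none) (g' := g) (by intro i _; simp) (by intro i _; rfl)]
        exact convF_none_left g j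
      rw [h2, pvOmax_none_right]
      simp
    | succ k =>
      have h1 : (if (0:Nat) = k + 1 then some v else none) = (none : Option Int) := by simp
      have h2 : convF (fun i => if i + 1 = k + 1 then some v else none) g j
          = convF (fun i => if i = k then some v else none) g j := by
        apply convF_congr <;> intro i _
        · simp
        · rfl
      rw [h1, h2, ih k g, pvOadd_none_left, pvOmax_none_left]
      rcases Nat.lt_or_ge j k with h | h
      · rw [if_neg (by omega), if_neg (by omega)]
      · rw [if_pos (by omega), if_pos (by omega), Nat.succ_sub_succ]

theorem convF_single_right (v : Int) (j : Nat) :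
    ∀ (k : Nat) (f : Nat → Option Int),
      convF f (fun i => if i = k then some v else none) j
        = if k ≤ j then pvOadd (f (j - k)) (some v) else none := by
  induction j with
  | zero =>
    intro k f
    rw [convF_zero]
    cases k with
    | zero => simp
    | succ k => simp [pvOadd_none_right]
  | succ j ih =>
    intro k f
    rw [convF_succ, ih k (fun i => f (i+1))]
    by_cases h1 : k ≤ j
    · rw [if_pos h1, if_pos (show k ≤ j + 1 by omega),
          if_neg (show ¬ j + 1 = k by omega), pvOadd_none_right, pvOmax_none_left]
      congr 2
      omega
    · rw [if_neg h1]
      by_cases h2 : k = j + 1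
      · subst h2
        rw [if_pos (show j + 1 ≤ j + 1 from le_refl _), if_pos (show j + 1 = j + 1 from rfl),
            pvOmax_none_right, Nat.sub_self]
      · rw [if_neg (show ¬ k ≤ j + 1 by omega), if_neg (show ¬ j + 1 = k by omega),
            pvOadd_none_right]
        rfl

theorem convF_omax_left (f1 f2 g : Nat → Option Int) (j : Nat) :
    convF (fun i => pvOmax (f1 i) (f2 i)) g j = pvOmax (convF f1 g j) (convF f2 g j) := by
  unfold convF
  have : ((List.range (j+1)).map (fun j1 => pvOadd (pvOmax (f1 j1) (f2 j1)) (g (j - j1))))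
      = (List.range (j+1)).map (fun j1 =>
          pvOmax (pvOadd (f1 j1) (g (j - j1))) (pvOadd (f2 j1) (g (j - j1)))) := by
    apply List.map_congr_left; intro a _; exact pvOadd_omax_right _ _ _
  rw [this, bigomax_map_omax]

theorem convF_shift (x : Int) (f' f g : Nat → Option Int)
    (h0 : f' 0 = none) (hs : ∀ i, f' (i+1) = pvOadd (some x) (f i)) :
    ∀ j, convF f' g j = (match j with
      | 0 => none
      | j+1 => pvOadd (some x) (convF f g j)) := by
  intro j
  cases j with
  | zero => rw [convF_zero, h0]; rfl
  | succ j =>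
    rw [convF_succ, h0, pvOadd_none_left, pvOmax_none_left]
    show convF (fun i => f' (i+1)) g j = pvOadd (some x) (convF f g j)
    have : convF (fun i => f' (i+1)) g j = convF (fun i => pvOadd (some x) (f i)) g j := by
      apply convF_congr <;> intro i _
      · exact hs i
      · rfl
    rw [this]
    unfold convF
    have : ((List.range (j+1)).map (fun j1 => pvOadd (pvOadd (some x) (f j1)) (g (j - j1))))
        = (List.range (j+1)).map (fun j1 => pvOadd (some x) (pvOadd (f j1) (g (j - j1)))) := by
      apply List.map_congr_left; intro a _; exact pvOadd_assoc _ _ _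
    rw [this, bigomax_map_oadd_left]


-- E sc a b j: best sum of exactly j pairwise non-adjacent picks in sc, with
-- first-picked status a and last-picked status b; none = infeasible ([] is an unused filler)
def E : List Int → Bool → Bool → Nat → Option Int
  | [], _, _, _ => none
  | [x], a, b, j =>
      if a = b then
        (if a then (if j = 1 then some x else none) else (if j = 0 then some (0:Int) else none))
      else none
  | _ :: y :: s, false, b, j => pvOmax (E (y::s) false b j) (E (y::s) true b j)
  | _ :: _ :: _, true, _, 0 => none
  | x :: y :: s, true, b, j+1 => pvOadd (some x) (E (y::s) false b j)

theorem E_single_ff (x : Int) : E [x] false false = fun j => if j = 0 then some (0:Int) else none := by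
  funext j; simp [E]

theorem E_single_tt (x : Int) : E [x] true true = fun j => if j = 1 then some x else none := by
  funext j; simp [E]

theorem E_single_ft (x : Int) : E [x] false true = fun _ => none := by
  funext j; simp [E]

theorem E_single_tf (x : Int) : E [x] true false = fun _ => none := by
  funext j; simp [E]

theorem E_cons_false (x y : Int) (s : List Int) (b : Bool) (j : Nat) :
    E (x :: y :: s) false b j = pvOmax (E (y::s) false b j) (E (y::s) true b j) := rfl

theorem E_cons_true_succ (x y : Int) (s : List Int) (b : Bool) (j : Nat) :
    E (x :: y :: s) true b (j+1) = pvOadd (some x) (E (y::s) false b j) := rfl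

-- feasibility bound: with first status a, at most ⌈len/2⌉ (a = true) resp. ⌊len/2⌋ picks fit
theorem E_none : ∀ (sc : List Int) (a b : Bool) (j : Nat),
    (if a then (sc.length + 1) / 2 else sc.length / 2) < j → E sc a b j = none := by
  intro sc
  induction sc with
  | nil => intro a b j _; rfl
  | cons x s ih =>
    cases s with
    | nil =>
      intro a b j h
      cases a <;> cases b <;> simp_all [E] <;> omega
    | cons y s' =>
      intro a b j h
      cases a with
      | false =>
        rw [E_cons_false, ih false b j (by simp at h ⊢; omega),
            ih true b j (by simp at h ⊢; omega)]
        rfl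
      | true =>
        cases j with
        | zero => simp at h
        | succ j =>
          rw [E_cons_true_succ, ih false b j (by simp at h ⊢; omega), pvOadd_none_right]

theorem E_none' (sc : List Int) (a b : Bool) (j : Nat) (h : (sc.length + 1) / 2 < j) :
    E sc a b j = none := by
  apply E_none
  cases a
  · simp; omega
  · simpa using h

-- merging profiles: allowed boundary pairs (skip,skip), (skip,take), (take,skip)
def mergeF (P Q : Bool → Bool → Nat → Option Int) (a c : Bool) (j : Nat) : Option Int :=
  pvOmax (pvOmax (convF (P a false) (Q false c) j) (convF (P a false) (Q true c) j))
    (convF (P a true) (Q false c) j)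

theorem mergeF_E : ∀ (s t : List Int), s ≠ [] → t ≠ [] → ∀ (a c : Bool) (j : Nat),
    mergeF (E s) (E t) a c j = E (s ++ t) a c j := by
  intro s
  induction s with
  | nil => intro t h; exact absurd rfl h
  | cons x s ih =>
    cases s with
    | nil =>
      -- s = [x]
      intro t _ ht a c j
      obtain ⟨u, t', rfl⟩ : ∃ u t', t = u :: t' := by
        cases t with
        | nil => exact absurd rfl ht
        | cons u t' => exact ⟨u, t', rfl⟩
      cases a with
      | false =>
        unfold mergeF
        rw [E_single_ff, E_single_ft, convF_single_left, convF_single_left, convF_none_left]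
        simp only [Nat.zero_le, if_pos, Nat.sub_zero, pvOadd_zero_left, pvOmax_none_right]
        rfl
      | true =>
        unfold mergeF
        rw [E_single_tf, E_single_tt, convF_none_left, convF_none_left, convF_single_left]
        simp only [pvOmax_none_left]
        cases j with
        | zero => rw [if_neg (by omega)]; rfl
        | succ j => rw [if_pos (by omega), Nat.succ_sub_one]; rfl
    | cons y s' =>
      intro t _ ht a c j
      have hs' : (y :: s') ≠ [] := by simp
      cases a with
      | false =>
        unfold mergeF
        have hfun : ∀ b : Bool, E (x :: y :: s') false b
            = fun i => pvOmax (E (y::s') false b i) (E (y::s') true b i) := by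
          intro b; funext i; exact E_cons_false x y s' b i
        rw [hfun, hfun, convF_omax_left, convF_omax_left, convF_omax_left]
        have goal_rhs : E ((x :: y :: s') ++ t) false c j
            = pvOmax (E ((y::s') ++ t) false c j) (E ((y::s') ++ t) true c j) := by
          cases t with
          | nil => exact absurd rfl ht
          | cons u t' => rfl
        rw [goal_rhs, ← ih t hs' ht false c j, ← ih t hs' ht true c j]
        unfold mergeF
        simp only [pvOmax_comm, pvOmax_left_comm]
      | true =>
        unfold mergeF
        have h0 : ∀ b : Bool, E (x :: y :: s') true b 0 = none := fun b => rfl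
        have hsucc : ∀ (b : Bool) (i : Nat),
            E (x :: y :: s') true b (i+1) = pvOadd (some x) (E (y::s') false b i) := by
          intro b i; rfl
        rw [convF_shift x _ (E (y::s') false false) (E t false c) (h0 false) (hsucc false),
            convF_shift x _ (E (y::s') false false) (E t true c) (h0 false) (hsucc false),
            convF_shift x _ (E (y::s') false true) (E t false c) (h0 true) (hsucc true)]
        cases j with
        | zero =>
          have : E ((x :: y :: s') ++ t) true c 0 = none := by
            cases t with
            | nil => exact absurd rfl ht
            | cons u t' => rfl
          rw [this]
          rfl
        | succ j =>
          simp only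
          rw [← pvOadd_omax_left, ← pvOadd_omax_left]
          have goal_rhs : E ((x :: y :: s') ++ t) true c (j+1)
              = pvOadd (some x) (E ((y::s') ++ t) false c j) := by
            cases t with
            | nil => exact absurd rfl ht
            | cons u t' => rfl
          rw [goal_rhs, ← ih t hs' ht false c j]
          rfl

theorem pvOmax_abcd (A B C D : Option Int) :
    pvOmax (pvOmax A B) (pvOmax C D) = pvOmax (pvOmax A C) (pvOmax B D) := by
  rw [pvOmax_assoc, pvOmax_assoc]
  congr 1
  rw [← pvOmax_assoc, ← pvOmax_assoc, pvOmax_comm B C]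

-- the mathematical content of the lists the port builds
def profRow (n : Nat) (sc : List Int) (a b : Bool) : List (Option Int) :=
  (List.range (min n ((sc.length + 1) / 2) + 1)).map (E sc a b)

theorem getD_profRow (n : Nat) (sc : List Int) (a b : Bool) (i : Nat) (hi : i ≤ n) :
    (profRow n sc a b).getD i none = E sc a b i := by
  unfold profRow
  by_cases h : i < min n ((sc.length + 1) / 2) + 1
  · rw [List.getD_eq_getElem?_getD, List.getElem?_map, List.getElem?_range h]
    rfl
  · rw [List.getD_eq_default _ _ (by simp; omega)]
    rw [E_none' sc a b i (by omega)]

theorem pvConv_profRow (n : Nat) (s t : List Int) (a b a' b' : Bool) (j : Nat) (hj : j ≤ n) :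
    pvConv (profRow n s a b) (profRow n t a' b') j = convF (E s a b) (E t a' b') j := by
  unfold pvConv convF
  rw [← List.foldl_map
    (f := fun j1 => pvOadd ((profRow n s a b).getD j1 none) ((profRow n t a' b').getD (j - j1) none))
    (g := pvOmax)]
  show bigomax _ = bigomax _
  congr 1
  apply List.map_congr_left
  intro j1 hj1
  simp only [List.mem_range] at hj1
  rw [getD_profRow n s a b j1 (by omega), getD_profRow n t a' b' (j - j1) (by omega)]

theorem pvRowB_profRow (n : Nat) (L R : List Int) (hL : L ≠ []) (hR : R ≠ []) (a c : Bool) :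
    pvRowB (profRow n L a false) (profRow n L a true) (profRow n R false c) (profRow n R true c)
        (min n (((L ++ R).length + 1) / 2) + 1) = profRow n (L ++ R) a c := by
  unfold pvRowB
  conv_rhs => unfold profRow
  apply List.map_congr_left
  intro j hj
  simp only [List.mem_range] at hj
  have hjn : j ≤ n := by omega
  rw [pvConv_profRow n L R a false false c j hjn, pvConv_profRow n L R a false true c j hjn,
      pvConv_profRow n L R a true false c j hjn]
  exact mergeF_E L R hL hR a c j

theorem pvProfB_eq_aux (n : Nat) : ∀ (N : Nat) (sc : List Int), sc.length ≤ N → sc ≠ [] →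
    pvProfB n sc
      = (profRow n sc false false, profRow n sc false true,
         profRow n sc true false, profRow n sc true true) := by
  intro N
  induction N with
  | zero =>
    intro sc hlen hne
    cases sc with
    | nil => exact absurd rfl hne
    | cons x s => simp at hlen
  | succ N ihN =>
    intro sc hlen hne
    match sc with
    | [] => exact absurd rfl hne
    | [x] =>
      rw [pvProfB]
      have hone : ∀ a b : Bool, profRow n [x] a b = (List.range (min n 1 + 1)).map (E [x] a b) := by
        intro a b
        unfold profRow
        norm_num
      rw [hone, hone, hone, hone]
      refine Prod.ext ?_ (Prod.ext ?_ (Prod.ext ?_ ?_)) <;>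
        · simp only
          apply List.map_congr_left
          intro i _
          simp [E]
    | x :: y :: rest =>
      rw [pvProfB]
      have hmid1 : 1 ≤ (x :: y :: rest).length / 2 := by simp; omega
      have hmid2 : (x :: y :: rest).length / 2 < (x :: y :: rest).length := by simp; omega
      have hLne : (x :: y :: rest).take ((x :: y :: rest).length / 2) ≠ [] := by
        intro h
        have h2 := congrArg List.length h
        simp only [List.length_take, List.length_cons, List.length_nil] at h2
        omega
      have hRne : (x :: y :: rest).drop ((x :: y :: rest).length / 2) ≠ [] := by
        intro h
        have h2 := congrArg List.length h
        simp only [List.length_drop, List.length_cons, List.length_nil] at h2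
        omega
      rw [ihN _ (by simp at hlen ⊢; omega) hLne, ihN _ (by simp at hlen ⊢; omega) hRne]
      generalize hL : (x :: y :: rest).take ((x :: y :: rest).length / 2) = L at *
      generalize hR : (x :: y :: rest).drop ((x :: y :: rest).length / 2) = R at *
      have hLR : L ++ R = x :: y :: rest := by rw [← hL, ← hR]; exact List.take_append_drop _ _
      rw [← hLR]
      unfold pvMergeB
      exact Prod.ext (pvRowB_profRow n L R hLne hRne false false)
        (Prod.ext (pvRowB_profRow n L R hLne hRne false true)
          (Prod.ext (pvRowB_profRow n L R hLne hRne true false)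
            (pvRowB_profRow n L R hLne hRne true true)))

-- running maximum over f 0 .. f j
def obestUpTo (f : Nat → Option Int) (j : Nat) : Option Int :=
  bigomax ((List.range (j+1)).map f)

theorem obestUpTo_zero (f : Nat → Option Int) : obestUpTo f 0 = f 0 := by
  simp [obestUpTo, List.range_succ, bigomax, pvOmax_none_left]

theorem obestUpTo_succ (f : Nat → Option Int) (j : Nat) :
    obestUpTo f (j+1) = pvOmax (obestUpTo f j) (f (j+1)) := by
  unfold obestUpTo
  rw [List.range_succ, List.map_append, bigomax_append]
  simp [bigomax, pvOmax_none_left]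

theorem obestUpTo_congr {f g : Nat → Option Int} (j : Nat) (h : ∀ i, i ≤ j → f i = g i) :
    obestUpTo f j = obestUpTo g j := by
  unfold obestUpTo
  congr 1
  apply List.map_congr_left
  intro i hi
  simp only [List.mem_range] at hi
  exact h i (by omega)

theorem obestUpTo_none (j : Nat) : obestUpTo (fun _ => (none : Option Int)) j = none := by
  unfold obestUpTo
  exact bigomax_map_none _

theorem obestUpTo_omax (f g : Nat → Option Int) (j : Nat) :
    obestUpTo (fun i => pvOmax (f i) (g i)) j = pvOmax (obestUpTo f j) (obestUpTo g j) :=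
  bigomax_map_omax _ f g

theorem obestUpTo_single (k : Nat) (v : Int) (j : Nat) :
    obestUpTo (fun i => if i = k then some v else none) j
      = if k ≤ j then some v else none := by
  induction j with
  | zero =>
    rw [obestUpTo_zero]
    cases k with
    | zero => simp
    | succ k => simp
  | succ j ih =>
    rw [obestUpTo_succ, ih]
    by_cases h : k ≤ j
    · rw [if_pos h, if_pos (show k ≤ j + 1 by omega),
          if_neg (show ¬ j + 1 = k by omega), pvOmax_none_right]
    · rw [if_neg h]
      by_cases h2 : k = j + 1
      · rw [if_pos (show j + 1 = k by omega), if_pos (show k ≤ j + 1 by omega), pvOmax_none_left]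
      · rw [if_neg (show ¬ j + 1 = k by omega), if_neg (show ¬ k ≤ j + 1 by omega),
            pvOmax_none_left]

theorem obestUpTo_stable (f : Nat → Option Int) (K : Nat) (h : ∀ i, K < i → f i = none) :
    ∀ m, K ≤ m → obestUpTo f m = obestUpTo f K := by
  intro m
  induction m with
  | zero => intro hm; rw [Nat.le_zero.mp hm]
  | succ m ihm =>
    intro hm
    rcases Nat.lt_or_ge K (m+1) with hlt | hge
    · rw [obestUpTo_succ, h (m+1) hlt, pvOmax_none_right, ihm (by omega)]
    · have : K = m + 1 := by omega
      rw [this]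

theorem obestUpTo_shiftR (f g : Nat → Option Int) (x : Int)
    (h0 : f 0 = none) (hs : ∀ i, f (i+1) = pvOadd (g i) (some x)) (j : Nat) :
    obestUpTo f (j+1) = pvOadd (obestUpTo g j) (some x) := by
  unfold obestUpTo
  rw [List.range_succ_eq_map, List.map_cons, bigomax_cons, h0, pvOmax_none_left, List.map_map]
  have : (List.range (j+1)).map (f ∘ Nat.succ)
      = (List.range (j+1)).map (fun i => pvOadd (g i) (some x)) := by
    apply List.map_congr_left
    intro i _
    exact hs i
  rw [this, bigomax_map_oadd_right]

-- right-append rules for E, derived from the merge theorem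
theorem E_snoc_false (p : List Int) (x : Int) (hp : p ≠ []) (a : Bool) (j : Nat) :
    E (p ++ [x]) a false j = pvOmax (E p a false j) (E p a true j) := by
  rw [← mergeF_E p [x] hp (by simp) a false j]
  unfold mergeF
  rw [E_single_ff, E_single_tf, convF_single_right, convF_none_right, convF_single_right]
  rw [if_pos (Nat.zero_le j), if_pos (Nat.zero_le j), Nat.sub_zero,
      pvOadd_zero_right, pvOadd_zero_right, pvOmax_none_right]

theorem E_snoc_true_zero (p : List Int) (x : Int) (hp : p ≠ []) (a : Bool) :
    E (p ++ [x]) a true 0 = none := by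
  rw [← mergeF_E p [x] hp (by simp) a true 0]
  unfold mergeF
  rw [E_single_ft, E_single_tt, convF_none_right, convF_none_right, convF_single_right]
  rw [if_neg (by omega)]
  rfl

theorem E_snoc_true_succ (p : List Int) (x : Int) (hp : p ≠ []) (a : Bool) (j : Nat) :
    E (p ++ [x]) a true (j+1) = pvOadd (E p a false j) (some x) := by
  rw [← mergeF_E p [x] hp (by simp) a true (j+1)]
  unfold mergeF
  rw [E_single_ft, E_single_tt, convF_none_right, convF_none_right, convF_single_right]
  rw [if_pos (by omega), pvOmax_none_left, pvOmax_none_right, Nat.add_sub_cancel]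

-- the grand bridge: max over the profile entries with last status b, up to j picks
theorem bridge : ∀ (sc : List Int), sc ≠ [] → ∀ j : Nat,
    pvOmax (obestUpTo (E sc false false) j) (obestUpTo (E sc true false) j)
        = some (dpF sc (sc.length - 1) j)
  ∧ pvOmax (obestUpTo (E sc false true) j) (obestUpTo (E sc true true) j)
        = (if j = 0 then none else some (takeF sc sc.length j)) := by
  intro sc
  induction sc using List.reverseRecOn with
  | nil => intro h; exact absurd rfl h
  | append_singleton p x ih =>
    intro _ j
    rcases eq_or_ne p [] with rfl | hp
    · -- the singleton [x]
      simp only [List.nil_append, List.length_cons, List.length_nil]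
      rw [E_single_ff, E_single_ft, E_single_tf, E_single_tt]
      rw [obestUpTo_single, obestUpTo_none, obestUpTo_single]
      constructor
      · rw [if_pos (Nat.zero_le j), pvOmax_none_right]
        rfl
      · rw [pvOmax_none_left]
        cases j with
        | zero => rw [if_neg (by omega), if_pos rfl]
        | succ j =>
          rw [if_pos (by omega), if_neg (by omega)]
          simp [takeF, dpF_zero_left]
    · have hlen : 1 ≤ p.length := by
        cases p with
        | nil => exact absurd rfl hp
        | cons a b => simp
      have hlen2 : (p ++ [x]).length - 1 = p.length := by simp
      constructor
      · -- last element skipped: best over a prefix one shorter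
        have e1 : ∀ a : Bool, obestUpTo (E (p ++ [x]) a false) j
            = pvOmax (obestUpTo (E p a false) j) (obestUpTo (E p a true) j) := by
          intro a
          rw [obestUpTo_congr j (fun i _ => E_snoc_false p x hp a i), obestUpTo_omax]
        rw [e1, e1, pvOmax_abcd, (ih hp j).1, (ih hp j).2, hlen2]
        cases j with
        | zero =>
          rw [if_pos rfl, pvOmax_none_right, dpF_zero_right, dpF_zero_right]
        | succ j =>
          rw [if_neg (Nat.succ_ne_zero j)]
          show some (max (dpF p (p.length - 1) (j+1)) (takeF p p.length (j+1))) = _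
          rw [max_comm, max_take_skip, ← dpF_prefix p [x] p.length (j+1) (le_refl _)]
      · -- last element taken
        cases j with
        | zero =>
          rw [if_pos rfl, obestUpTo_zero, obestUpTo_zero,
              E_snoc_true_zero p x hp false, E_snoc_true_zero p x hp true]
          rfl
        | succ j =>
          have e2 : ∀ a : Bool, obestUpTo (E (p ++ [x]) a true) (j+1)
              = pvOadd (obestUpTo (E p a false) j) (some x) := fun a =>
            obestUpTo_shiftR _ _ x (E_snoc_true_zero p x hp a)
              (fun i => E_snoc_true_succ p x hp a i) j
          rw [e2, e2, ← pvOadd_omax_right, (ih hp j).1, if_neg (Nat.succ_ne_zero j)]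
          show some (dpF p (p.length - 1) j + x) = some (takeF (p ++ [x]) (p ++ [x]).length (j+1))
          have hget : (p ++ [x]).getD ((p ++ [x]).length - 1) 0 = x := by
            rw [hlen2, List.getD, List.getElem?_append_right (le_refl _), Nat.sub_self]
            rfl
          have harg : (p ++ [x]).length - 2 = p.length - 1 := by
            simp only [List.length_append, List.length_cons, List.length_nil]
            omega
          rw [takeF]
          rw [if_neg (by simp)]
          rw [hget]
          rw [harg]
          rw [Nat.add_sub_cancel]
          rw [dpF_prefix p [x] (p.length - 1) j (by omega)]
          exact congrArg some (Int.add_comm _ _)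

theorem pvBestB_eq (n : Nat) (sc : List Int) : pvBestB n sc = dpF sc sc.length n := by
  unfold pvBestB
  by_cases h : sc = []
  · rw [if_pos h, h]
    rfl
  · rw [if_neg h]
    simp only
    rw [pvProfB_eq_aux n sc.length sc (le_refl _) h]
    simp only
    rw [foldl_omax_eq, foldl_omax_eq, foldl_omax_eq, foldl_omax_eq, pvOmax_none_left]
    have hB : ∀ a b : Bool, bigomax (profRow n sc a b) = obestUpTo (E sc a b) n := by
      intro a b
      show obestUpTo (E sc a b) (min n ((sc.length + 1) / 2)) = obestUpTo (E sc a b) n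
      rcases le_total n ((sc.length + 1) / 2) with hc | hc
      · rw [min_eq_left hc]
      · rw [min_eq_right hc]
        exact (obestUpTo_stable (E sc a b) _ (fun i hi => E_none' sc a b i hi) n hc).symm
    rw [hB, hB, hB, hB, pvOmax_assoc, pvOmax_abcd, (bridge sc h n).1, (bridge sc h n).2]
    cases n with
    | zero =>
      rw [if_pos rfl, pvOmax_none_right]
      show dpF sc (sc.length - 1) 0 = dpF sc sc.length 0
      rw [dpF_zero_right, dpF_zero_right]
    | succ m =>
      rw [if_neg (Nat.succ_ne_zero m)]
      show max (dpF sc (sc.length - 1) (m+1)) (takeF sc sc.length (m+1)) = dpF sc sc.length (m+1)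
      rw [max_comm]
      exact max_take_skip sc sc.length (m+1)

-- ===== VERDICT (by name: the statement is the Claim_ definition above) =====
theorem maxSizeSlices_spec : Claim_equal_maxSizeSlices := by
  intro slices _
  unfold Spec_maxSizeSlices maxSizeSlices maxSizeSlices_alt
  simp only
  rw [pvHelp_eq, pvHelp_eq, pvBestB_eq, pvBestB_eq]
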